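-- pv_equiv track=rewrite | github.com/algorithm-study-2021/Algorithm_Study_2021 | 김유진/4week/5.py | checkBinary
-- ===== SOURCE A (Python) =====
-- def checkBinary(a,b):
--     abin=bin(a)
--     bbin=bin(b)
--
--     oneina=0; oneinb=0
--     for i in abin:
--         if i=='1':
--             oneina+=1
--     for i in bbin:
--         if i=='1':
--             oneinb+=1
--
--     return oneina==oneinb
-- ===== SOURCE B (Python) =====
-- def checkBinary(a, b):
--     def popcount(n):
--         n = abs(n)
--         c = 0
--         while n:
--             c += n & 1
--             n >>= 1
--         return c
--     return popcount(a) == popcount(b)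
-- ===== Notes on version B (the rewrite author's own statement) =====
-- stated objective: idiomatic
-- what changed: Replaces building bin() strings and scanning their characters with a direct shift-and-mask popcount over abs(n).
import Mathlib
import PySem

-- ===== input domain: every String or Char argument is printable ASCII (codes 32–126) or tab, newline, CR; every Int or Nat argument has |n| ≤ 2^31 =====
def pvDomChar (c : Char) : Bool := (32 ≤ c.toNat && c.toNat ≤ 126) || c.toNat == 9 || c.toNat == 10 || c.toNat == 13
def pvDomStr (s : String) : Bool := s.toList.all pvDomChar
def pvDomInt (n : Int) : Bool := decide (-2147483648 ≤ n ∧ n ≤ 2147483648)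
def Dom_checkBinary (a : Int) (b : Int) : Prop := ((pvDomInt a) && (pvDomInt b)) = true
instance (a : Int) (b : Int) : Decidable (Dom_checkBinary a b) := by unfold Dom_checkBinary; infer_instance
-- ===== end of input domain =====

-- B replaces building bin() strings and scanning characters with a direct shift-and-mask popcount over abs(n).
-- ===== PORT A =====
-- helper: the binary digit characters of n (empty for 0), as Python's bin() produces them
def pyBinDigits : Nat → List Char
  | 0 => []
  | n+1 => pyBinDigits ((n+1)/2) ++ [if (n+1) % 2 = 1 then '1' else '0']
decreasing_by exact Nat.div_lt_self (Nat.succ_pos n) (by omega)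

-- bin(n) as a character list: optional '-', then "0b", then digits ("0" for zero)
def pyBin (n : Int) : List Char :=
  (if n < 0 then ['-'] else []) ++ ['0','b'] ++
    (if n.natAbs = 0 then ['0'] else pyBinDigits n.natAbs)

def checkBinary (a : Int) (b : Int) : Bool :=
  let abin := pyBin a
  let bbin := pyBin b
  let oneina := abin.foldl (fun c i => if i = '1' then c + 1 else c) 0
  let oneinb := bbin.foldl (fun c i => if i = '1' then c + 1 else c) 0
  oneina == oneinb

-- ===== PORT B =====
def popcount : Nat → Nat
  | 0 => 0
  | n+1 => ((n+1) &&& 1) + popcount ((n+1) >>> 1)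
decreasing_by simpa [Nat.shiftRight_one] using Nat.div_lt_self (Nat.succ_pos n) (by omega)

def checkBinary_alt (a : Int) (b : Int) : Bool :=
  popcount a.natAbs == popcount b.natAbs

-- ===== PRECONDITION & SPEC =====
def Spec_checkBinary (a : Int) (b : Int) (out : Bool) : Prop := out = checkBinary_alt a b
instance (a : Int) (b : Int) (out : Bool) : Decidable (Spec_checkBinary a b out) := by unfold Spec_checkBinary; infer_instance

-- ===== CLAIM =====
def Claim_equal_checkBinary : Prop := ∀ (a : Int) (b : Int), Dom_checkBinary a b → Spec_checkBinary a b (checkBinary a b)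

-- ===== LEMMAS AND PROOFS =====
theorem foldl_count_ones (l : List Char) (acc : Nat) :
    l.foldl (fun c i => if i = '1' then c + 1 else c) acc = acc + l.count '1' := by
  induction l generalizing acc with
  | nil => simp
  | cons x xs ih =>
    simp only [List.foldl_cons, List.count_cons, ih]
    by_cases h : x = '1' <;> simp [h, beq_iff_eq] <;> try omega

theorem count_pyBinDigits (n : Nat) : (pyBinDigits n).count '1' = popcount n := by
  induction n using Nat.strong_induction_on with
  | _ n ih =>
    match n with
    | 0 => simp [pyBinDigits, popcount]
    | m+1 =>
      rw [pyBinDigits, popcount, List.count_append,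
        ih ((m+1)/2) (Nat.div_lt_self (Nat.succ_pos m) (by omega))]
      have h1 : (m+1) &&& 1 = (m+1) % 2 := Nat.and_one_is_mod _
      have h2 : (m+1) >>> 1 = (m+1) / 2 := Nat.shiftRight_one _
      rw [h1, h2]
      by_cases h : (m+1) % 2 = 1 <;> simp [h] <;> omega

theorem count_pyBin (n : Int) : (pyBin n).count '1' = popcount n.natAbs := by
  unfold pyBin
  by_cases hz : n.natAbs = 0 <;>
    by_cases hn : n < 0 <;>
      simp [hz, hn, count_pyBinDigits, popcount]

-- ===== VERDICT =====
theorem checkBinary_spec : Claim_equal_checkBinary := by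
  intro a b _
  unfold Spec_checkBinary checkBinary checkBinary_alt
  simp only [foldl_count_ones, Nat.zero_add, count_pyBin]
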